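-- pv_equiv track=rewrite | github.com/pypi-data/pypi-mirror-404 | packages/notte/notte-1.8.3.tar.gz/notte-1.8.3/docs/src/sniptest/parser.py | format_line_spec
-- ===== SOURCE A (Python) =====
-- def format_line_spec(lines: list[int]) -> str:
--     """Format a list of line numbers back into spec format like '1-3,5'."""
--     if not lines:
--         return ""
--
--     lines = sorted(set(lines))
--     ranges = []
--     start = lines[0]
--     end = lines[0]
--
--     for line in lines[1:]:
--         if line == end + 1:
--             end = line
--         else:
--             ranges.append((start, end))
--             start = line
--             end = line
--     ranges.append((start, end))
--
--     parts = []
--     for start, end in ranges: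
--         if start == end:
--             parts.append(str(start))
--         else:
--             parts.append(f"{start}-{end}")
--
--     return ",".join(parts)
-- ===== SOURCE B (Python) =====
-- def format_line_spec(lines: list[int]) -> str:
--     """Format a list of line numbers back into spec format like '1-3,5'."""
--     s = set(lines)
--     starts = sorted(v for v in s if v - 1 not in s)
--     ends = sorted(v for v in s if v + 1 not in s)
--     return ",".join(str(lo) if lo == hi else f"{lo}-{hi}"
--                     for lo, hi in zip(starts, ends))
-- ===== Notes on version B (the rewrite author's own statement) =====
-- stated objective: alternative
-- what changed: Instead of walking the sorted list with a (start,end) accumulator and an explicit flush, B finds run boundaries by set membership: a value is a run start iff v-1 is not in the set and a run end iff v+1 is not in the set; zipping the sorted starts with the sorted ends yields the ranges, and the empty-list special case disappears.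
import Mathlib
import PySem

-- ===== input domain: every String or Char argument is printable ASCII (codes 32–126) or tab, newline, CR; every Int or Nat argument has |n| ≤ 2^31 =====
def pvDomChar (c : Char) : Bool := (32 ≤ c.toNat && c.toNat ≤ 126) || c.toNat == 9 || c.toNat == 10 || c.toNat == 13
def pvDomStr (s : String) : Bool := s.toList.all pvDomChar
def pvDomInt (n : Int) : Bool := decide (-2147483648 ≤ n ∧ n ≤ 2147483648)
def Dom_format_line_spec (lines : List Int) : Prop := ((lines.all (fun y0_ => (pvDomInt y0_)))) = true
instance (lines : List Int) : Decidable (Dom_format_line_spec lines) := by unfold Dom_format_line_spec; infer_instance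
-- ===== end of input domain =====

-- B replaces the sequential (start,end) accumulator with set-membership boundary detection
-- (v starts a run iff v-1 ∉ set, ends one iff v+1 ∉ set; zip sorted starts with sorted ends);
-- return values are proved equal.

-- ===== PORT A =====
-- the loop body of A's range-building 'for' (state: (ranges, start, end))
def pvStepA (acc : List (Int × Int) × Int × Int) (line : Int) : List (Int × Int) × Int × Int :=
  if line = acc.2.2 + 1 then (acc.1, acc.2.1, line)
  else (acc.1 ++ [(acc.2.1, acc.2.2)], line, line)

def format_line_spec (lines : List Int) : String :=
  if lines = [] then ""
  else
    let xs := PySem.List.sorted (PySem.Set.ofList lines) (fun x => x) false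
    let start := PySem.List.pyGetD xs 0 0
    let e := PySem.List.pyGetD xs 0 0
    let st := (PySem.List.slice xs (some 1) none).foldl pvStepA ([], start, e)
    let ranges := st.1 ++ [(st.2.1, st.2.2)]
    let parts := ranges.foldl
      (fun parts p =>
        if p.1 = p.2 then parts ++ [PySem.Int.toStr p.1]
        else parts ++ [PySem.Int.toStr p.1 ++ "-" ++ PySem.Int.toStr p.2]) []
    PySem.Str.join "," parts

-- ===== PORT B =====
def format_line_spec_alt (lines : List Int) : String :=
  let s := PySem.Set.ofList lines
  let starts := PySem.List.sorted (s.filter (fun v => decide (v - 1 ∉ s))) (fun x => x) false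
  let ends := PySem.List.sorted (s.filter (fun v => decide (v + 1 ∉ s))) (fun x => x) false
  PySem.Str.join "," ((starts.zip ends).map (fun p =>
    if p.1 = p.2 then PySem.Int.toStr p.1
    else PySem.Int.toStr p.1 ++ "-" ++ PySem.Int.toStr p.2))

-- ===== PRECONDITION & SPEC =====
def Spec_format_line_spec (lines : List Int) (out : String) : Prop := out = format_line_spec_alt lines
instance (lines : List Int) (out : String) : Decidable (Spec_format_line_spec lines out) := by unfold Spec_format_line_spec; infer_instance

-- ===== CLAIM (what is proved, stated in full; the proofs are below) =====
def Claim_equal_format_line_spec : Prop := ∀ (lines : List Int), Dom_format_line_spec lines → Spec_format_line_spec lines (format_line_spec lines)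

-- ===== LEMMAS AND PROOFS =====

-- common reference: the maximal runs of consecutive integers, current run (s, e), rest l
def pvRuns (s e : Int) : List Int → List (Int × Int)
  | [] => [(s, e)]
  | x :: l => if x = e + 1 then pvRuns s x l else (s, e) :: pvRuns x x l

-- A's fold (with the trailing flush) computes pvRuns
theorem pvFoldA_eq (l : List Int) : ∀ (r : List (Int × Int)) (s e : Int),
    (let st := l.foldl pvStepA (r, s, e); st.1 ++ [(st.2.1, st.2.2)]) = r ++ pvRuns s e l := by
  induction l with
  | nil => intro r s e; simp [pvRuns]
  | cons x l ih =>
    intro r s e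
    simp only [List.foldl_cons, pvStepA, pvRuns]
    by_cases h : x = e + 1
    · subst h; simpa using ih r s (e + 1)
    · simp [h, ih (r ++ [(s, e)]) x x]

-- the head of pvRuns starts at s; the rest does not depend on s
theorem pvRuns_shape (l : List Int) : ∀ (e : Int), ∃ e' rest, ∀ s, pvRuns s e l = (s, e') :: rest := by
  induction l with
  | nil => intro e; exact ⟨e, [], fun s => rfl⟩
  | cons x l ih =>
    intro e
    by_cases h : x = e + 1
    · subst h
      obtain ⟨e', rest, hr⟩ := ih (e + 1)
      exact ⟨e', rest, fun s => by simp [pvRuns, hr s]⟩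
    · obtain ⟨e', rest, hr⟩ := ih x
      exact ⟨e, (x, e') :: rest, fun s => by simp [pvRuns, h, hr x]⟩

-- A's parts loop is a map
theorem pvParts_eq_map (ranges : List (Int × Int)) : ∀ (acc : List String),
    ranges.foldl
      (fun parts (p : Int × Int) =>
        if p.1 = p.2 then parts ++ [PySem.Int.toStr p.1]
        else parts ++ [PySem.Int.toStr p.1 ++ "-" ++ PySem.Int.toStr p.2]) acc
    = acc ++ ranges.map (fun p =>
        if p.1 = p.2 then PySem.Int.toStr p.1
        else PySem.Int.toStr p.1 ++ "-" ++ PySem.Int.toStr p.2) := by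
  induction ranges with
  | nil => intro acc; simp
  | cons p ps ih =>
    intro acc
    by_cases h : p.1 = p.2 <;> simp [h, ih]

-- zipping the first and second components back together recovers the pair list
theorem pvZipFstSnd (l : List (Int × Int)) : (l.map Prod.fst).zip (l.map Prod.snd) = l := by
  induction l with
  | nil => rfl
  | cons p ps ih => simp [ih]

-- boundary filters on a strictly increasing chain a::t = the start/end columns of pvRuns
theorem pvBoundary (t : List Int) : ∀ (a : Int), (a :: t).Pairwise (· < ·) →
    (a :: t).filter (fun v => decide (v - 1 ∉ a :: t)) = (pvRuns a a t).map Prod.fst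
    ∧ (a :: t).filter (fun v => decide (v + 1 ∉ a :: t)) = (pvRuns a a t).map Prod.snd := by
  induction t with
  | nil =>
    intro a _
    constructor <;> · simp [pvRuns]
  | cons x t' ih =>
    intro a h
    have h1 : ∀ b ∈ x :: t', a < b := (List.pairwise_cons.mp h).1
    have h2 : (x :: t').Pairwise (· < ·) := (List.pairwise_cons.mp h).2
    have hax : a < x := h1 x (by simp)
    have hxle : ∀ y ∈ x :: t', x ≤ y := by
      intro y hy
      rcases List.mem_cons.mp hy with rfl | hy
      · exact le_refl _
      · exact le_of_lt ((List.pairwise_cons.mp h2).1 y hy)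
    obtain ⟨ihs, ihe⟩ := ih x h2
    by_cases hxa : x = a + 1
    · subst hxa
      obtain ⟨e', rest, hr⟩ := pvRuns_shape t' (a + 1)
      -- the head a+1 is kept by the starts filter on x::t'
      have hhead : decide ((a + 1) - 1 ∉ (a + 1) :: t') = true := by
        simp only [decide_eq_true_eq]
        intro hmem
        exact absurd (hxle _ hmem) (by omega)
      have hts : t'.filter (fun v => decide (v - 1 ∉ (a + 1) :: t')) = rest.map Prod.fst := by
        have := ihs
        rw [List.filter_cons, hhead] at this
        rw [hr (a + 1)] at this
        simpa using this
      constructor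
      · -- starts
        simp only [pvRuns]
        rw [hr a]
        rw [List.filter_cons]
        have ha : decide (a - 1 ∉ a :: (a + 1) :: t') = true := by
          simp only [decide_eq_true_eq, List.mem_cons]
          push Not
          refine ⟨by omega, by omega, fun hm => absurd (hxle _ (List.mem_cons_of_mem _ hm)) (by omega)⟩
        rw [ha]
        rw [List.filter_cons]
        have hx : decide ((a + 1) - 1 ∉ a :: (a + 1) :: t') = false := by
          simp
        rw [hx]
        have : t'.filter (fun v => decide (v - 1 ∉ a :: (a + 1) :: t'))
            = t'.filter (fun v => decide (v - 1 ∉ (a + 1) :: t')) := by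
          apply List.filter_congr
          intro v hv
          have hvgt : a + 1 < v := (List.pairwise_cons.mp h2).1 v hv
          apply decide_eq_decide.mpr
          simp only [List.mem_cons]
          constructor
          · intro hn; push Not at hn ⊢; exact ⟨hn.2.1, hn.2.2⟩
          · intro hn; push Not at hn ⊢; exact ⟨by omega, hn.1, hn.2⟩
        rw [this, hts]
        simp
      · -- ends
        simp only [pvRuns]
        rw [hr a]
        have goal2 : (a :: (a + 1) :: t').filter (fun v => decide (v + 1 ∉ a :: (a + 1) :: t'))
            = ((a + 1) :: t').filter (fun v => decide (v + 1 ∉ (a + 1) :: t')) := by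
          rw [List.filter_cons]
          have ha : decide (a + 1 ∉ a :: (a + 1) :: t') = false := by simp
          rw [ha]
          apply List.filter_congr
          intro v hv
          have hvge : a + 1 ≤ v := hxle v hv
          apply decide_eq_decide.mpr
          simp only [List.mem_cons]
          constructor
          · intro hn; push Not at hn ⊢; exact ⟨hn.2.1, hn.2.2⟩
          · intro hn; push Not at hn ⊢; exact ⟨by omega, hn.1, hn.2⟩
        rw [goal2, ihe, hr (a + 1)]
        simp
    · -- gap: a+1 < x
      have hgap : a + 1 < x := by omega
      have hmemL : ∀ v, v ∈ x :: t' →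
          ((v - 1 ∈ a :: x :: t') ↔ (v - 1 ∈ x :: t')) ∧ ((v + 1 ∈ a :: x :: t') ↔ (v + 1 ∈ x :: t')) := by
        intro v hv
        have hvge : x ≤ v := hxle v hv
        constructor <;>
        · simp only [List.mem_cons]
          constructor
          · rintro (he | hm)
            · omega
            · exact hm
          · intro hm; right; exact hm
      constructor
      · simp only [pvRuns, if_neg hxa]
        rw [List.filter_cons]
        have ha : decide (a - 1 ∉ a :: x :: t') = true := by
          simp only [decide_eq_true_eq, List.mem_cons]
          push Not
          refine ⟨by omega, by omega, fun hm => absurd (hxle _ (List.mem_cons_of_mem _ hm)) (by omega)⟩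
        rw [ha]
        have : (x :: t').filter (fun v => decide (v - 1 ∉ a :: x :: t'))
            = (x :: t').filter (fun v => decide (v - 1 ∉ x :: t')) := by
          apply List.filter_congr
          intro v hv
          exact decide_eq_decide.mpr (not_congr (hmemL v hv).1)
        rw [this, ihs]
        simp
      · simp only [pvRuns, if_neg hxa]
        rw [List.filter_cons]
        have ha : decide (a + 1 ∉ a :: x :: t') = true := by
          simp only [decide_eq_true_eq, List.mem_cons]
          push Not
          refine ⟨by omega, by omega, fun hm => absurd (hxle _ (List.mem_cons_of_mem _ hm)) (by omega)⟩
        rw [ha]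
        have : (x :: t').filter (fun v => decide (v + 1 ∉ a :: x :: t'))
            = (x :: t').filter (fun v => decide (v + 1 ∉ x :: t')) := by
          apply List.filter_congr
          intro v hv
          exact decide_eq_decide.mpr (not_congr (hmemL v hv).2)
        rw [this, ihe]
        simp

-- sorting a boundary filter of the set = the same filter of the sorted set
theorem pvSortedFilter (lines : List Int) (d : Int) :
    PySem.List.sorted ((PySem.Set.ofList lines).filter
        (fun v => decide (v + d ∉ PySem.Set.ofList lines))) (fun x => x) false
    = (PySem.List.sorted (PySem.Set.ofList lines) (fun x => x) false).filter
        (fun v => decide (v + d ∉ PySem.List.sorted (PySem.Set.ofList lines) (fun x => x) false)) := by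
  set s := PySem.Set.ofList lines with hs
  set xs := PySem.List.sorted s (fun x => x) false with hxs
  have hmem : ∀ v : Int, v ∈ xs ↔ v ∈ s := fun v => PySem.List.mem_sorted _ _ _ _
  have hfc : s.filter (fun v => decide (v + d ∉ s))
      = s.filter (fun v => decide (v + d ∉ xs)) := by
    apply List.filter_congr
    intro v _
    exact decide_eq_decide.mpr (not_congr (hmem (v + d)).symm)
  rw [hfc]
  have hperm : (xs.filter (fun v => decide (v + d ∉ xs))).Perm
      (s.filter (fun v => decide (v + d ∉ xs))) :=
    (PySem.List.sorted_perm s (fun x => x) false).filter _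
  have hpw : (xs.filter (fun v => decide (v + d ∉ xs))).Pairwise (· < ·) :=
    (PySem.List.sorted_ofList_pairwise_lt lines).filter _
  exact PySem.List.sorted_eq_of_perm_of_pairwise_lt _ _ _ hperm hpw

-- ===== VERDICT (by name: the statement is the Claim_ definition above) =====
theorem format_line_spec_spec : Claim_equal_format_line_spec := by
  intro lines _
  unfold Spec_format_line_spec format_line_spec format_line_spec_alt
  by_cases hnil : lines = []
  · simp [hnil, PySem.Set.ofList, PySem.List.sorted, PySem.Str.join]
  · simp only [if_neg hnil]
    have hs1 := pvSortedFilter lines (-1)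
    have hs2 := pvSortedFilter lines 1
    simp only [show ∀ v : Int, v + (-1) = v - 1 from fun v => by ring] at hs1
    rw [hs1, hs2]
    set xs := PySem.List.sorted (PySem.Set.ofList lines) (fun x => x) false with hxs
    have hne : xs ≠ [] := by
      have : lines.head hnil ∈ xs := by
        rw [hxs, PySem.List.mem_sorted, PySem.Set.mem_ofList]
        exact List.head_mem hnil
      exact List.ne_nil_of_mem this
    obtain ⟨a, t, hat⟩ := List.exists_cons_of_ne_nil hne
    have hpw : xs.Pairwise (· < ·) := PySem.List.sorted_ofList_pairwise_lt lines
    rw [hat] at hpw ⊢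
    obtain ⟨hbs, hbe⟩ := pvBoundary t a hpw
    rw [hbs, hbe, pvZipFstSnd]
    rw [PySem.List.slice_from_one]
    simp only [List.tail_cons, PySem.List.pyGetD_zero_cons]
    rw [pvFoldA_eq t [] a a, pvParts_eq_map]
    simp
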